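-- pv_equiv track=rewrite | github.com/KazukiNoSuzaku/Leetcode | Python/0411_Minimum_Unique_Word_Abbreviation.py | minAbbreviation
-- ===== SOURCE A (Python) =====
-- def minAbbreviation(target, dictionary):
--     n = len(target)
--     if not dictionary:
--         return str(n)
--
--     # diff[i] = bitmask of positions where target differs from dictionary[i]
--     diffs = []
--     for word in dictionary:
--         if len(word) != n:
--             continue
--         mask = 0
--         for j in range(n):
--             if target[j] != word[j]:
--                 mask |= 1 << j
--         diffs.append(mask)
--
--     if not diffs:
--         return str(n)
--
--     def abbr_len(mask):
--         # count length of abbreviation with 1-bits = keep, 0-bits = abbreviate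
--         length = 0
--         prev_zero = False
--         for j in range(n):
--             if mask & (1 << j):
--                 length += 1
--                 prev_zero = False
--             else:
--                 if not prev_zero:
--                     length += 1
--                 prev_zero = True
--         return length
--
--     best = target  # worst case keep all chars
--     for mask in range(1 << n):
--         # mask bit=1 means keep that char
--         if all(mask & diff for diff in diffs):
--             # valid: differs from every dict word at at least one kept position
--             ab = abbr_len(mask)
--             if ab < len(best):
--                 # build abbreviation string
--                 res = []
--                 count = 0
--                 for j in range(n):
--                     if mask & (1 << j):
--                         if count:
--                             res.append(str(count))
--                             count = 0
--                         res.append(target[j])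
--                     else:
--                         count += 1
--                 if count:
--                     res.append(str(count))
--                 best = ''.join(res)
--     return best
-- ===== SOURCE B (Python) =====
-- def minAbbreviation(target, dictionary):
--     n = len(target)
--     diffs = []
--     for word in dictionary:
--         if len(word) == n:
--             m = 0
--             for j in range(n):
--                 if word[j] != target[j]:
--                     m += 1 << j
--             diffs.append(m)
--     if not diffs:
--         return str(n)
--
--     def tokens(mask):
--         # one left-to-right pass producing the abbreviation's token list
--         toks = []
--         run = 0
--         for j in range(n):
--             if mask >> j & 1:
--                 if run:
--                     toks.append(str(run))
--                     run = 0
--                 toks.append(target[j])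
--             else:
--                 run += 1
--         if run:
--             toks.append(str(run))
--         return toks
--
--     def go(bit, mask, rem, best):
--         # DFS over keep-masks in ascending numeric order; rem = dictionary
--         # diff-masks not yet hit by a kept position (narrowed incrementally)
--         if bit < 0:
--             if rem:
--                 return best
--             toks = tokens(mask)
--             if len(toks) < len(best):
--                 return ''.join(toks)
--             return best
--         best = go(bit - 1, mask, rem, best)
--         return go(bit - 1, mask | (1 << bit), [d for d in rem if not d >> bit & 1], best)
--
--     return go(n - 1, 0, diffs, target)
-- ===== Notes on version B (the rewrite author's own statement) =====
-- stated objective: alternative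
-- what changed: Replaces A's flat scan over all 2^n keep-masks (each doing a full dictionary-wide validity re-check, a separate abbreviation-length pass and a rebuild pass) by a DFS over bit positions that narrows the list of unmet dictionary diff-masks incrementally and produces the abbreviation's token list (chars and run counts) in a single pass.
import Mathlib
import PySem

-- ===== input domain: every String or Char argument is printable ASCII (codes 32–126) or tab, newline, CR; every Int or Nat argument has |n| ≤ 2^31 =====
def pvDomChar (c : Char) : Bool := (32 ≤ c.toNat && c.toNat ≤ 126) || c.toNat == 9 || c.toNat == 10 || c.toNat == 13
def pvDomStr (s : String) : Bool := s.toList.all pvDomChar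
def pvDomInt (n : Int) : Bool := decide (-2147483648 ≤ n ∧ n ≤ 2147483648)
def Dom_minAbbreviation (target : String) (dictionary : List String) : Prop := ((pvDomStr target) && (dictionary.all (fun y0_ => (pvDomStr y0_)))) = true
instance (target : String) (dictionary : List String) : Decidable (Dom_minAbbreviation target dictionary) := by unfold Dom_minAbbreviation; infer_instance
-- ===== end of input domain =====

-- B replaces A's flat scan over all 2^n keep-masks (per-mask full validity re-check, separate
-- length pass and rebuild) by a DFS over bit positions that narrows the list of unmet dictionary
-- diff-masks incrementally and produces the abbreviation's token list in one pass: an alternative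
-- decomposition of the same exhaustive search (same asymptotic cost, not claimed faster).

-- ===== PORT A =====
-- mask |= 1 << j at every position j where target[j] != word[j]  (indices always in range)
def pvMaskA (tl wl : List Char) (n : Nat) : Nat :=
  (List.range n).foldl (fun mask j =>
    if tl.getD j ' ' ≠ wl.getD j ' ' then mask ||| (1 <<< j) else mask) 0

def pvDiffsA (tl : List Char) (n : Nat) (dictionary : List String) : List Nat :=
  dictionary.foldl (fun diffs word =>
    if word.toList.length ≠ n then diffs
    else diffs ++ [pvMaskA tl word.toList n]) []

-- A's abbr_len: (length, prev_zero) state over j in range(n)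
def pvAbbrLen (n mask : Nat) : Nat :=
  ((List.range n).foldl (fun (st : Nat × Bool) j =>
    if mask &&& (1 <<< j) ≠ 0 then (st.1 + 1, false)
    else (if st.2 = false then st.1 + 1 else st.1, true)) (0, false)).1

-- A's inline build of the abbreviation string: (res, count) state, then final flush and join
def pvBuildA (tl : List Char) (n mask : Nat) : String :=
  let st := (List.range n).foldl (fun (st : List String × Nat) j =>
    if mask &&& (1 <<< j) ≠ 0 then
      ((if st.2 ≠ 0 then st.1 ++ [PySem.Int.toStr (st.2 : Int)] else st.1)
        ++ [String.singleton (tl.getD j ' ')], 0)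
    else (st.1, st.2 + 1)) ([], 0)
  String.join (if st.2 ≠ 0 then st.1 ++ [PySem.Int.toStr (st.2 : Int)] else st.1)

-- body of A's `for mask in range(1 << n)` loop
def pvStepA (tl : List Char) (n : Nat) (diffs : List Nat) (best : String) (mask : Nat) : String :=
  if diffs.all (fun d => mask &&& d != 0) then
    if pvAbbrLen n mask < best.length then pvBuildA tl n mask else best
  else best

def minAbbreviation (target : String) (dictionary : List String) : String :=
  let tl := target.toList
  let n := tl.length
  if dictionary = [] then PySem.Int.toStr (n : Int)
  else
    let diffs := pvDiffsA tl n dictionary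
    if diffs = [] then PySem.Int.toStr (n : Int)
    else (List.range (1 <<< n)).foldl (pvStepA tl n diffs) target

-- ===== PORT B =====
-- m += 1 << j at every mismatch position
def pvMaskB (tl wl : List Char) (n : Nat) : Nat :=
  (List.range n).foldl (fun m j =>
    if wl.getD j ' ' ≠ tl.getD j ' ' then m + (1 <<< j) else m) 0

def pvDiffsB (tl : List Char) (n : Nat) (dictionary : List String) : List Nat :=
  dictionary.foldl (fun diffs word =>
    if word.toList.length = n then diffs ++ [pvMaskB tl word.toList n] else diffs) []

-- B's tokens(mask): one pass producing the token list (kept chars and run counts)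
def pvTokens (tl : List Char) (n mask : Nat) : List String :=
  let st := (List.range n).foldl (fun (st : List String × Nat) j =>
    if (mask >>> j) &&& 1 ≠ 0 then
      ((if st.2 ≠ 0 then st.1 ++ [PySem.Int.toStr (st.2 : Int)] else st.1)
        ++ [String.singleton (tl.getD j ' ')], 0)
    else (st.1, st.2 + 1)) ([], 0)
  if st.2 ≠ 0 then st.1 ++ [PySem.Int.toStr (st.2 : Int)] else st.1

-- B's go(bit, mask, rem, best); fuel b = bit + 1 (Python's base case is bit < 0)
def pvGo (tl : List Char) (n : Nat) : Nat → Nat → List Nat → String → String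
  | 0, mask, rem, best =>
      if rem ≠ [] then best
      else
        let toks := pvTokens tl n mask
        if toks.length < best.length then String.join toks else best
  | b + 1, mask, rem, best =>
      pvGo tl n b (mask ||| (1 <<< b)) (rem.filter (fun d => (d >>> b) &&& 1 == 0))
        (pvGo tl n b mask rem best)

def minAbbreviation_alt (target : String) (dictionary : List String) : String :=
  let tl := target.toList
  let n := tl.length
  let diffs := pvDiffsB tl n dictionary
  if diffs = [] then PySem.Int.toStr (n : Int)
  else pvGo tl n n 0 diffs target

-- ===== PRECONDITION & SPEC =====
def Spec_minAbbreviation (target : String) (dictionary : List String) (out : String) : Prop := out = minAbbreviation_alt target dictionary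
instance (target : String) (dictionary : List String) (out : String) : Decidable (Spec_minAbbreviation target dictionary out) := by unfold Spec_minAbbreviation; infer_instance

-- ===== CLAIM (what is proved, stated in full; the proofs are below) =====
def Claim_equal_minAbbreviation : Prop := ∀ (target : String) (dictionary : List String), Dom_minAbbreviation target dictionary → Spec_minAbbreviation target dictionary (minAbbreviation target dictionary)

-- ===== LEMMAS AND PROOFS =====

-- bit toolkit
theorem pv_or_mod_two (a b : Nat) : (a ||| b) % 2 = a % 2 ||| b % 2 := by
  have h := Nat.testBit_or a b 0
  simp only [Nat.testBit_zero] at h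
  rcases Nat.mod_two_eq_zero_or_one a with h1|h1 <;> rcases Nat.mod_two_eq_zero_or_one b with h2|h2 <;>
    rcases Nat.mod_two_eq_zero_or_one (a|||b) with h3|h3 <;> simp_all

theorem pv_or_two_pow : ∀ (n m : Nat), m < 2^n → m ||| 2^n = m + 2^n := by
  intro n
  induction n with
  | zero => intro m h; interval_cases m; decide
  | succ n ih =>
    intro m h
    have hd : (m ||| 2^(n+1)) / 2 = m / 2 + 2^n := by
      rw [Nat.or_div_two]
      have h2 : 2^(n+1)/2 = 2^n := by omega
      rw [h2]
      exact ih _ (by omega)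
    have hm : (m ||| 2^(n+1)) % 2 = m % 2 := by
      rw [pv_or_mod_two]
      have h2 : (2^(n+1)) % 2 = 0 := by
        have he : 2^(n+1) = 2*2^n := by ring
        omega
      rw [h2, Nat.or_zero]
    have e1 : (m ||| 2^(n+1)) = 2 * ((m ||| 2^(n+1))/2) + (m ||| 2^(n+1)) % 2 := by omega
    have e2 : 2^(n+1) = 2*2^n := by ring
    omega

theorem pv_or_eq_zero (x y : Nat) : x ||| y = 0 ↔ x = 0 ∧ y = 0 := by
  constructor
  · intro h
    constructor <;> { apply Nat.eq_of_testBit_eq; intro i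
                      have hb := congrArg (fun z => z.testBit i) h
                      simp at hb ⊢
                      simp [hb] }
  · rintro ⟨rfl, rfl⟩; rfl

theorem pv_bit_cond (mask j : Nat) : (mask &&& (1 <<< j) ≠ 0) ↔ ((mask >>> j) &&& 1 ≠ 0) := by
  rw [Nat.one_shiftLeft, Nat.and_two_pow, Nat.and_one_is_mod, Nat.shiftRight_eq_div_pow]
  rcases h : mask.testBit j with _|_ <;>
    rw [Nat.testBit_eq_decide_div_mod_eq] at h <;> simp at h <;> simp [h]

-- diff masks agree
theorem pv_mask_lt (tl wl : List Char) : ∀ (n : Nat), pvMaskA tl wl n < 2^n := by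
  intro n
  induction n with
  | zero => simp [pvMaskA]
  | succ n ih =>
    unfold pvMaskA at ih ⊢
    rw [List.range_succ, List.foldl_append]
    simp only [List.foldl_cons, List.foldl_nil]
    have h2 : (2:Nat)^n < 2^(n+1) := by
      have he : (2:Nat)^(n+1) = 2*2^n := by ring
      omega
    split
    · exact Nat.or_lt_two_pow (by omega) (by rw [Nat.one_shiftLeft]; omega)
    · omega

theorem pv_mask_eq (tl wl : List Char) : ∀ (n : Nat), pvMaskB tl wl n = pvMaskA tl wl n := by
  intro n
  induction n with
  | zero => rfl
  | succ n ih =>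
    unfold pvMaskA pvMaskB at ih ⊢
    rw [List.range_succ, List.foldl_append, List.foldl_append]
    simp only [List.foldl_cons, List.foldl_nil]
    rw [ih]
    have hlt := pv_mask_lt tl wl n
    unfold pvMaskA at hlt
    rcases eq_or_ne (tl.getD n ' ') (wl.getD n ' ') with h|h
    · rw [if_neg (fun hc => hc h.symm), if_neg (fun hc => hc h)]
    · rw [if_pos (Ne.symm h), if_pos h, Nat.one_shiftLeft, pv_or_two_pow n _ hlt]

theorem pv_diffs_aux (tl : List Char) (n : Nat) :
    ∀ (dict : List String) (acc : List Nat),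
      dict.foldl (fun diffs word =>
        if word.toList.length = n then diffs ++ [pvMaskB tl word.toList n] else diffs) acc
      = dict.foldl (fun diffs word =>
        if word.toList.length ≠ n then diffs else diffs ++ [pvMaskA tl word.toList n]) acc := by
  intro dict
  induction dict with
  | nil => intro acc; rfl
  | cons w ws ih =>
    intro acc
    simp only [List.foldl_cons]
    by_cases h : w.toList.length = n
    · rw [if_pos h, if_neg (fun hc => hc h), pv_mask_eq, ih]
    · rw [if_neg h, if_pos h, ih]

theorem pv_diffs_eq (tl : List Char) (n : Nat) (dictionary : List String) :
    pvDiffsB tl n dictionary = pvDiffsA tl n dictionary := by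
  unfold pvDiffsA pvDiffsB
  exact pv_diffs_aux tl n dictionary []

-- named copies of the two loop bodies (proof-side only)
def pvLenStep (mask : Nat) (st : Nat × Bool) (j : Nat) : Nat × Bool :=
  if mask &&& (1 <<< j) ≠ 0 then (st.1 + 1, false)
  else (if st.2 = false then st.1 + 1 else st.1, true)

def pvTokStep (tl : List Char) (mask : Nat) (st : List String × Nat) (j : Nat) : List String × Nat :=
  if mask &&& (1 <<< j) ≠ 0 then
    ((if st.2 ≠ 0 then st.1 ++ [PySem.Int.toStr (st.2 : Int)] else st.1)
      ++ [String.singleton (tl.getD j ' ')], 0)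
  else (st.1, st.2 + 1)

def pvFlush (st : List String × Nat) : List String :=
  if st.2 ≠ 0 then st.1 ++ [PySem.Int.toStr (st.2 : Int)] else st.1

theorem pv_tokens_eq_fold (tl : List Char) (n mask : Nat) :
    pvTokens tl n mask = pvFlush ((List.range n).foldl (pvTokStep tl mask) ([], 0)) := by
  have hf : (List.range n).foldl (fun (st : List String × Nat) j =>
      if (mask >>> j) &&& 1 ≠ 0 then
        ((if st.2 ≠ 0 then st.1 ++ [PySem.Int.toStr (st.2 : Int)] else st.1)
          ++ [String.singleton (tl.getD j ' ')], 0)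
      else (st.1, st.2 + 1)) ([], 0)
      = (List.range n).foldl (pvTokStep tl mask) ([], 0) := by
    apply List.foldl_ext
    intro acc j _
    unfold pvTokStep
    by_cases h : mask &&& (1 <<< j) ≠ 0
    · rw [if_pos ((pv_bit_cond mask j).mp h), if_pos h]
    · rw [if_neg (fun hc => h ((pv_bit_cond mask j).mpr hc)), if_neg h]
  exact congrArg pvFlush hf

theorem pv_build_eq (tl : List Char) (n mask : Nat) :
    pvBuildA tl n mask = String.join (pvTokens tl n mask) := by
  rw [pv_tokens_eq_fold]
  rfl

theorem pv_flush_len (st : List String × Nat) :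
    (pvFlush st).length = st.1.length + (if st.2 ≠ 0 then 1 else 0) := by
  unfold pvFlush
  split <;> simp_all

theorem pv_state_rel (tl : List Char) (mask : Nat) :
    ∀ (js : List Nat) (st1 : Nat × Bool) (st2 : List String × Nat),
      st1.1 = (pvFlush st2).length → st1.2 = (st2.2 != 0) →
      (js.foldl (pvLenStep mask) st1).1 = (pvFlush (js.foldl (pvTokStep tl mask) st2)).length
        ∧ (js.foldl (pvLenStep mask) st1).2 = ((js.foldl (pvTokStep tl mask) st2).2 != 0) := by
  intro js
  induction js with
  | nil => intro st1 st2 h1 h2; exact ⟨h1, h2⟩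
  | cons j js ih =>
    intro st1 st2 h1 h2
    simp only [List.foldl_cons]
    rw [pv_flush_len] at h1
    by_cases h : mask &&& (1 <<< j) ≠ 0
    · refine ih _ _ ?_ ?_
      · rw [pv_flush_len]
        simp only [pvLenStep, pvTokStep, if_pos h]
        simp only [List.length_append]
        split at h1 <;> split <;> simp_all
      · simp only [pvLenStep, pvTokStep, if_pos h]
        rfl
    · refine ih _ _ ?_ ?_
      · rw [pv_flush_len]
        simp only [pvLenStep, pvTokStep, if_neg h]
        rcases hz : st2.2 with _|k
        · have hb : st1.2 = false := by rw [h2, hz]; rfl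
          simp only [hb, hz] at h1 ⊢
          simp at h1
          simp [h1]
        · have hb : st1.2 = true := by rw [h2, hz]; rfl
          simp only [hb, hz] at h1 ⊢
          simp at h1 ⊢
          omega
      · simp only [pvLenStep, pvTokStep, if_neg h]
        simp

theorem pv_tokens_len (tl : List Char) (n mask : Nat) :
    (pvTokens tl n mask).length = pvAbbrLen n mask := by
  rw [pv_tokens_eq_fold]
  have h := pv_state_rel tl mask (List.range n) (0, false) ([], 0) (by simp [pvFlush]) (by simp)
  unfold pvAbbrLen
  rw [show (fun (st : Nat × Bool) j =>
    if mask &&& (1 <<< j) ≠ 0 then (st.1 + 1, false)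
    else (if st.2 = false then st.1 + 1 else st.1, true)) = pvLenStep mask from rfl]
  exact h.1.symm

-- filter narrowing: hitting bit b refines the unmet-diffs list exactly as or-ing the mask does
theorem pv_bool_helper (u v X : Nat) (hor : X = 0 ↔ (u = 0 ∧ v = 0)) :
    ((v == 0) && (u == 0)) = (X == 0) := by
  by_cases h1 : u = 0 <;> by_cases h2 : v = 0
  · have hx := hor.mpr ⟨h1, h2⟩
    simp [h1, h2, hx]
  · have hx : X ≠ 0 := fun hc => h2 (hor.mp hc).2
    rw [beq_eq_false_iff_ne.mpr h2, beq_eq_false_iff_ne.mpr hx, Bool.false_and]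
  · have hx : X ≠ 0 := fun hc => h1 (hor.mp hc).1
    rw [beq_eq_false_iff_ne.mpr h1, beq_eq_false_iff_ne.mpr hx, Bool.and_false]
  · have hx : X ≠ 0 := fun hc => h1 (hor.mp hc).1
    rw [beq_eq_false_iff_ne.mpr h1, beq_eq_false_iff_ne.mpr hx, Bool.and_false]

theorem pv_filter_step (diffs : List Nat) (mask b : Nat) :
    (diffs.filter (fun d => mask &&& d == 0)).filter (fun d => (d >>> b) &&& 1 == 0)
      = diffs.filter (fun d => (mask ||| (1 <<< b)) &&& d == 0) := by
  rw [List.filter_filter]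
  apply List.filter_congr
  intro d _
  have hd : (mask ||| (1 <<< b)) &&& d = (mask &&& d) ||| ((1 <<< b) &&& d) :=
    Nat.and_or_distrib_right mask (1 <<< b) d
  have hbit : ((1 <<< b) &&& d = 0) ↔ ((d >>> b) &&& 1 = 0) := by
    rw [Nat.and_comm]
    constructor
    · intro h
      by_contra hc
      exact absurd ((pv_bit_cond d b).mpr hc) (by simp [h])
    · intro h
      by_contra hc
      exact absurd ((pv_bit_cond d b).mp hc) (by simp [h])
  have hor : (mask ||| (1 <<< b)) &&& d = 0 ↔ (mask &&& d = 0 ∧ (d >>> b) &&& 1 = 0) := by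
    rw [hd, pv_or_eq_zero]
    exact and_congr Iff.rfl hbit
  exact pv_bool_helper (mask &&& d) ((d >>> b) &&& 1) ((mask ||| (1 <<< b)) &&& d) hor

-- the DFS enumerates exactly A's ascending mask scan
theorem pv_go_eq (tl : List Char) (n : Nat) (diffs : List Nat) :
    ∀ (b mask : Nat) (best : String),
      (∀ i, i < b → mask.testBit i = false) →
      pvGo tl n b mask (diffs.filter (fun d => mask &&& d == 0)) best
        = ((List.range (2^b)).map (fun l => mask ||| l)).foldl (pvStepA tl n diffs) best := by
  intro b
  induction b with
  | zero =>
    intro mask best _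
    rw [pow_zero, List.range_one]
    simp only [List.map_cons, List.map_nil, List.foldl_cons, List.foldl_nil, Nat.or_zero]
    by_cases hrem : diffs.filter (fun d => mask &&& d == 0) = []
    · have hall : diffs.all (fun d => mask &&& d != 0) = true := by
        rw [List.all_eq_true]
        intro d hd
        have := List.filter_eq_nil_iff.mp hrem d hd
        simpa using this
      unfold pvGo pvStepA
      rw [if_neg (fun hc => hc hrem), if_pos hall]
      show (if (pvTokens tl n mask).length < best.length then String.join (pvTokens tl n mask) else best) = _
      rw [pv_tokens_len, pv_build_eq]
    · have hall : diffs.all (fun d => mask &&& d != 0) = false := by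
        rcases List.exists_mem_of_ne_nil _ hrem with ⟨d, hd⟩
        have hmem := List.mem_filter.mp hd
        rw [List.all_eq_false]
        exact ⟨d, hmem.1, by simpa using hmem.2⟩
      unfold pvGo pvStepA
      rw [if_pos hrem, hall]
      simp
  | succ b ih =>
    intro mask best hbit
    have hbit' : ∀ i, i < b → (mask ||| (1 <<< b)).testBit i = false := by
      intro i hi
      rw [Nat.testBit_or, hbit i (by omega), Nat.one_shiftLeft, Nat.testBit_two_pow]
      simp
      omega
    show pvGo tl n (b+1) mask (diffs.filter (fun d => mask &&& d == 0)) best = _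
    unfold pvGo
    rw [ih mask best (fun i hi => hbit i (by omega)), pv_filter_step,
        ih (mask ||| (1 <<< b)) _ hbit']
    have h2 : 2^(b+1) = 2^b + 2^b := by ring
    rw [h2, List.range_add, List.map_append, List.foldl_append, List.map_map]
    congr 1
    apply List.map_congr_left
    intro l hl
    have hlt := List.mem_range.mp hl
    have : (2^b + l : Nat) = l ||| 2^b := by
      rw [pv_or_two_pow b l hlt]; omega
    simp only [Function.comp]
    rw [this, Nat.or_comm l (2^b), ← Nat.or_assoc, Nat.one_shiftLeft]

-- ===== VERDICT (by name: the statement is the Claim_ definition above) =====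
theorem minAbbreviation_spec : Claim_equal_minAbbreviation := by
  intro target dictionary _
  unfold Spec_minAbbreviation
  simp only [minAbbreviation, minAbbreviation_alt]
  rw [pv_diffs_eq]
  by_cases hd : dictionary = []
  · subst hd
    rw [if_pos rfl]
    have : pvDiffsA target.toList target.toList.length [] = [] := rfl
    rw [if_pos this]
  · rw [if_neg hd]
    by_cases hdiff : pvDiffsA target.toList target.toList.length dictionary = []
    · rw [if_pos hdiff, if_pos hdiff]
    · rw [if_neg hdiff, if_neg hdiff]
      have h := pv_go_eq target.toList target.toList.length
        (pvDiffsA target.toList target.toList.length dictionary)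
        target.toList.length 0 target (fun i _ => Nat.zero_testBit i)
      rw [show (pvDiffsA target.toList target.toList.length dictionary).filter
            (fun d => (0 : Nat) &&& d == 0)
          = pvDiffsA target.toList target.toList.length dictionary by
            apply List.filter_eq_self.mpr
            intro d _
            simp [Nat.zero_and]] at h
      rw [show (List.range (2^target.toList.length)).map (fun l => (0 : Nat) ||| l)
          = List.range (2^target.toList.length) by
            simp [Nat.zero_or]] at h
      rw [Nat.one_shiftLeft, h]
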